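-- pv_equiv track=rewrite | github.com/fun3md/GalvoLSUDriver | mirror_controller.py | gen_color_bars
-- ===== SOURCE A (Python) =====
-- from typing import Any, Dict, List, Optional, Tuple
--
-- def gen_color_bars(n_per_color: int) -> List[Dict[str, Any]]:
--     n = max(1, min(DOT_CAP // 3, int(n_per_color)))
--     out: List[Dict[str, Any]] = []
--     # R then G then B across the sweep
--     for i in range(n):
--         out.append({"idxNorm": int(i * 65535 / max(1, (n - 1))), "rgbMask": 0b001})
--     for i in range(n):
--         out.append({"idxNorm": int(i * 65535 / max(1, (n - 1))), "rgbMask": 0b010})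
--     for i in range(n):
--         out.append({"idxNorm": int(i * 65535 / max(1, (n - 1))), "rgbMask": 0b100})
--     # Sort by idxNorm so RMT builder is efficient/monotonic
--     out.sort(key=lambda d: d["idxNorm"])
--     return out[:DOT_CAP]
--
-- DOT_CAP = 1024
-- ===== SOURCE B (Python) =====
-- from typing import Any, Dict, List
--
-- DOT_CAP = 1024
--
-- def gen_color_bars(n_per_color: int) -> List[Dict[str, Any]]:
--     # Single pass: emit the three masks per sweep position, already in
--     # monotonic idxNorm order -- no sort needed (idxNorm is strictly
--     # increasing across i), and exact integer floor division replaces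
--     # the float round-trip (equal on this domain: i*65535 < 2**53).
--     n = max(1, min(DOT_CAP // 3, int(n_per_color)))
--     d = max(1, n - 1)
--     out: List[Dict[str, Any]] = []
--     for i in range(n):
--         v = i * 65535 // d
--         out.append({"idxNorm": v, "rgbMask": 0b001})
--         out.append({"idxNorm": v, "rgbMask": 0b010})
--         out.append({"idxNorm": v, "rgbMask": 0b100})
--     return out
-- ===== Notes on version B (the rewrite author's own statement) =====
-- stated objective: simpler
-- what changed: One loop emits the R/G/B triple per sweep position directly in monotonic idxNorm order, eliminating the three separate passes, the stable sort and the float division round-trip (exact integer floor division instead); the [:DOT_CAP] slice is dropped since 3*n <= 1023 < 1024 always.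
import Mathlib
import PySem

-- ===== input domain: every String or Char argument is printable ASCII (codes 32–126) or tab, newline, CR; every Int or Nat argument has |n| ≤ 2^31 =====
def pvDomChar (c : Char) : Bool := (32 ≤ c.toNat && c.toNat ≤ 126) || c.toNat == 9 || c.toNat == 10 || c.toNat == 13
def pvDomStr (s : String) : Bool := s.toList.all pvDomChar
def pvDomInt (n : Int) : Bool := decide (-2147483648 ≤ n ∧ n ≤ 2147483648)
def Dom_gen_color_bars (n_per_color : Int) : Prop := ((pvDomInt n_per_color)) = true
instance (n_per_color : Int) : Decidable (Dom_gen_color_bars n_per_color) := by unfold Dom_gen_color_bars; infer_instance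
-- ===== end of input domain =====

-- B replaces A's three passes + stable sort + float round-trip by one loop that
-- emits the points already in sorted order, using exact integer floor division.

-- ===== PORT A =====
-- the sort key lambda `lambda d: d["idxNorm"]` (key always present; assoc-list dict lookup)
def pvKeyA (dd : List (String × Int)) : Int := ((PySem.Dict.mk dd).get? "idxNorm").getD 0

def gen_color_bars (n_per_color : Int) : List (List (String × Int)) :=
  let n : Int := max 1 (min (PySem.Int.floordiv 1024 3) n_per_color)
  let out : List (List (String × Int)) := []
  -- `int(i * 65535 / max(1, (n - 1)))` is float true division then int() truncation;
  -- on the reachable domain (0 ≤ i < n ≤ 341) it equals integer floor division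
  -- exactly (numerator < 2^53, quotient nonnegative), ported so.
  let out := (PySem.List.pyRange 0 n).foldl
    (fun out i => out ++ [[("idxNorm", PySem.Int.floordiv (i * 65535) (max 1 (n - 1))), ("rgbMask", 1)]]) out
  let out := (PySem.List.pyRange 0 n).foldl
    (fun out i => out ++ [[("idxNorm", PySem.Int.floordiv (i * 65535) (max 1 (n - 1))), ("rgbMask", 2)]]) out
  let out := (PySem.List.pyRange 0 n).foldl
    (fun out i => out ++ [[("idxNorm", PySem.Int.floordiv (i * 65535) (max 1 (n - 1))), ("rgbMask", 4)]]) out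
  let out := PySem.List.sorted out pvKeyA
  PySem.List.slice out none (some 1024)

-- ===== PORT B =====
def gen_color_bars_alt (n_per_color : Int) : List (List (String × Int)) :=
  let n : Int := max 1 (min (PySem.Int.floordiv 1024 3) n_per_color)
  let d : Int := max 1 (n - 1)
  (PySem.List.pyRange 0 n).foldl
    (fun out i =>
      let v := PySem.Int.floordiv (i * 65535) d
      out ++ [[("idxNorm", v), ("rgbMask", 1)],
              [("idxNorm", v), ("rgbMask", 2)],
              [("idxNorm", v), ("rgbMask", 4)]]) []

-- ===== PRECONDITION & SPEC =====
def Spec_gen_color_bars (n_per_color : Int) (out : List (List (String × Int))) : Prop := out = gen_color_bars_alt n_per_color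
instance (n_per_color : Int) (out : List (List (String × Int))) : Decidable (Spec_gen_color_bars n_per_color out) := by unfold Spec_gen_color_bars; infer_instance

-- ===== CLAIM (what is proved, stated in full; the proofs are below) =====
def Claim_equal_gen_color_bars : Prop := ∀ (n_per_color : Int), Dom_gen_color_bars n_per_color → Spec_gen_color_bars n_per_color (gen_color_bars n_per_color)

-- ===== LEMMAS AND PROOFS =====

-- a point dict, proof-side shorthand
def pvDot (v m : Int) : List (String × Int) := [("idxNorm", v), ("rgbMask", m)]

theorem pvKeyA_pvDot (v m : Int) : pvKeyA (pvDot v m) = v := by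
  simp [pvKeyA, pvDot, PySem.Dict.get?_mk_cons]

-- insertBy walks past a prefix it does not insert into
theorem pv_insertBy_skip {α : Type} (bef : α → α → Bool) (x : α) (P Q : List α)
    (h : ∀ y ∈ P, bef x y = false) :
    PySem.List.insertBy bef x (P ++ Q) = P ++ PySem.List.insertBy bef x Q := by
  induction P with
  | nil => simp
  | cons p P ih =>
    have hp : bef x p = false := h p (by simp)
    simp only [List.cons_append, PySem.List.insertBy, hp, Bool.false_eq_true, if_false]
    exact congrArg (p :: ·) (ih fun y hy => h y (by simp [hy]))

-- insertBy puts x in front when it goes before everything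
theorem pv_insertBy_front {α : Type} (bef : α → α → Bool) (x : α) (Q : List α)
    (h : ∀ y ∈ Q, bef x y = true) :
    PySem.List.insertBy bef x Q = x :: Q := by
  cases Q with
  | nil => rfl
  | cons q Q => simp [PySem.List.insertBy, h q (by simp)]

-- stable insertion of a strictly-increasing-key block into the grouped list:
-- each x i lands at the end of its key group
theorem pv_merge {α : Type} (key : α → Int) (g : Nat → Int) (grp : Nat → List α) (x : Nat → α)
    (n : Nat)
    (hg : ∀ i j, i < j → j < n → g i < g j)
    (hgrp : ∀ i, i < n → ∀ y ∈ grp i, key y = g i)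
    (hx : ∀ i, i < n → key (x i) = g i) :
    ∀ (m k : Nat), k + m = n →
      List.foldl (fun acc z => PySem.List.insertBy (fun a b => decide (key a < key b)) z acc)
        ((List.range' 0 k).flatMap (fun i => grp i ++ [x i]) ++ (List.range' k m).flatMap grp)
        ((List.range' k m).map x)
      = (List.range' 0 n).flatMap (fun i => grp i ++ [x i]) := by
  intro m
  induction m with
  | zero =>
    intro k hk
    have : k = n := by omega
    subst this
    simp
  | succ m ih =>
    intro k hk
    have hkn : k < n := by omega
    rw [List.range'_succ]
    simp only [List.map_cons, List.flatMap_cons, List.foldl_cons]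
    have hstep :
        PySem.List.insertBy (fun a b => decide (key a < key b)) (x k)
          ((List.range' 0 k).flatMap (fun i => grp i ++ [x i]) ++ (grp k ++ (List.range' (k+1) m).flatMap grp))
        = (List.range' 0 (k+1)).flatMap (fun i => grp i ++ [x i]) ++ (List.range' (k+1) m).flatMap grp := by
      rw [← List.append_assoc]
      rw [pv_insertBy_skip]
      · rw [pv_insertBy_front]
        · have : List.range' 0 (k+1) = List.range' 0 k ++ [k] := by
            have := List.range'_concat (s := 0) (n := k) (step := 1)
            simpa using this
          rw [this]
          simp [List.append_assoc]
        · intro y hy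
          rcases List.mem_flatMap.mp hy with ⟨j, hj, hyj⟩
          have hjb : k + 1 ≤ j ∧ j < k + 1 + m := by
            have := List.mem_range'_1.mp hj
            omega
          have hky : key y = g j := hgrp j (by omega) y hyj
          have : g k < g j := hg k j (by omega) (by omega)
          simp [hx k hkn, hky, this]
      · intro y hy
        rcases List.mem_append.mp hy with hyT | hyk
        · rcases List.mem_flatMap.mp hyT with ⟨i, hi, hyi⟩
          have hib : i < k := by
            have := List.mem_range'_1.mp hi
            omega
          have hky : key y = g i := by
            rcases List.mem_append.mp hyi with h1 | h2
            · exact hgrp i (by omega) y h1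
            · simp at h2; subst h2; exact hx i (by omega)
          have : g i < g k := hg i k hib hkn
          simp [hx k hkn, hky]
          omega
        · have hky : key y = g k := hgrp k hkn y hyk
          simp [hx k hkn, hky]
    rw [hstep]
    exact ih (k + 1) (by omega)

-- pv_merge started at k = 0, with the start and the result stated up to conversion
theorem pv_merge0 {α : Type} (key : α → Int) (g : Nat → Int) (grp : Nat → List α) (x : Nat → α)
    (n : Nat)
    (hg : ∀ i j, i < j → j < n → g i < g j)
    (hgrp : ∀ i, i < n → ∀ y ∈ grp i, key y = g i)
    (hx : ∀ i, i < n → key (x i) = g i)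
    (acc res : List α)
    (hacc : acc = (List.range' 0 n).flatMap grp)
    (hres : res = (List.range' 0 n).flatMap (fun i => grp i ++ [x i])) :
    List.foldl (fun acc z => PySem.List.insertBy (fun a b => decide (key a < key b)) z acc)
      acc ((List.range' 0 n).map x) = res := by
  subst hacc hres
  simpa using pv_merge key g grp x n hg hgrp hx n 0 (by omega)

-- the stable sort of the three monotone blocks is the interleaving
theorem pv_sort3 {α : Type} (key : α → Int) (g : Nat → Int) (A B C : Nat → α) (n : Nat)
    (hg : ∀ i j, i < j → j < n → g i < g j)
    (hA : ∀ i, i < n → key (A i) = g i)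
    (hB : ∀ i, i < n → key (B i) = g i)
    (hC : ∀ i, i < n → key (C i) = g i) :
    PySem.List.sorted ((List.range n).map A ++ (List.range n).map B ++ (List.range n).map C) key
      = (List.range n).flatMap (fun i => [A i, B i, C i]) := by
  rw [PySem.List.sorted_eq_foldl_insertBy, List.foldl_append, List.foldl_append,
      List.range_eq_range']
  rw [pv_merge0 key g (fun _ => ([] : List α)) A n hg
        (by intro i _ y hy; simp at hy) hA
        [] ((List.range' 0 n).flatMap (fun i => [A i]))
        ((show (List.range' 0 n).flatMap (fun _ => ([] : List α)) = [] by simp).symm)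
        (by simp)]
  rw [pv_merge0 key g (fun i => [A i]) B n hg
        (by intro i hi y hy
            simp only [List.mem_cons, List.not_mem_nil, or_false] at hy
            subst hy; exact hA i hi) hB
        ((List.range' 0 n).flatMap (fun i => [A i]))
        ((List.range' 0 n).flatMap (fun i => [A i, B i])) rfl (by simp)]
  rw [pv_merge0 key g (fun i => [A i, B i]) C n hg
        (by intro i hi y hy
            simp only [List.mem_cons, List.not_mem_nil, or_false] at hy
            rcases hy with h | h
            · subst h; exact hA i hi
            · subst h; exact hB i hi) hC
        ((List.range' 0 n).flatMap (fun i => [A i, B i]))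
        ((List.range' 0 n).flatMap (fun i => [A i, B i, C i])) rfl (by simp)]

-- strict monotonicity of i ↦ (i*65535) // d for 1 ≤ d ≤ 65535
theorem pv_g_mono (d : Int) (hd1 : 1 ≤ d) (hd2 : d ≤ 65535) (i j : Nat) (hij : i < j) :
    PySem.Int.floordiv ((i : Int) * 65535) d < PySem.Int.floordiv ((j : Int) * 65535) d := by
  have h0 : (0 : Int) < d := by omega
  have hqd := PySem.Int.floordiv_mul_add_mod ((i : Int) * 65535) d
  have hr : 0 ≤ PySem.Int.mod ((i : Int) * 65535) d := PySem.Int.mod_nonneg _ h0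
  have hji : (i : Int) + 1 ≤ (j : Int) := by exact_mod_cast hij
  have hmul : ((i : Int) + 1) * 65535 ≤ (j : Int) * 65535 :=
    mul_le_mul_of_nonneg_right hji (by norm_num)
  have hstep : PySem.Int.floordiv ((i : Int) * 65535) d + 1 ≤ PySem.Int.floordiv ((j : Int) * 65535) d := by
    rw [PySem.Int.le_floordiv_iff_mul_le h0]
    nlinarith
  omega

theorem pv_main (n_per_color : Int) : gen_color_bars n_per_color = gen_color_bars_alt n_per_color := by
  have h341 : PySem.Int.floordiv 1024 3 = 341 := by decide
  unfold gen_color_bars gen_color_bars_alt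
  simp only [h341]
  set N : Int := max 1 (min 341 n_per_color) with hN
  have hN1 : 1 ≤ N := by omega
  have hN341 : N ≤ 341 := by omega
  set D : Int := max 1 (N - 1) with hD
  have hD1 : 1 ≤ D := by omega
  have hD65535 : D ≤ 65535 := by omega
  set n : Nat := N.toNat with hn
  have hNn : N = (n : Int) := by omega
  have hn341 : n ≤ 341 := by omega
  rw [PySem.List.pyRange_one]
  simp only [Int.sub_zero, zero_add, hNn, Int.toNat_natCast]
  -- fold shapes
  rw [PySem.List.foldl_append_singleton_eq_map, PySem.List.foldl_append_singleton_eq_map,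
      PySem.List.foldl_append_singleton_eq_map, PySem.List.foldl_append_eq_flatMap]
  simp only [List.nil_append, List.map_map, List.flatMap_map, Function.comp_def]
  -- the sort
  have hsort := pv_sort3 pvKeyA (fun i => PySem.Int.floordiv ((i : Int) * 65535) D)
        (fun i => pvDot (PySem.Int.floordiv ((i : Int) * 65535) D) 1)
        (fun i => pvDot (PySem.Int.floordiv ((i : Int) * 65535) D) 2)
        (fun i => pvDot (PySem.Int.floordiv ((i : Int) * 65535) D) 4) n
        (fun i j hij _ => pv_g_mono D hD1 hD65535 i j hij)
        (fun i _ => pvKeyA_pvDot _ _) (fun i _ => pvKeyA_pvDot _ _) (fun i _ => pvKeyA_pvDot _ _)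
  simp only [pvDot] at hsort
  rw [hsort]
  -- the slice is the identity: length = 3n ≤ 1023 < 1024
  rw [PySem.List.slice_to _ (by norm_num : (0 : Int) ≤ 1024)]
  rw [List.take_of_length_le]
  simp only [List.length_flatMap, List.map_const', List.sum_replicate, smul_eq_mul,
    List.length_range, List.length_cons, List.length_nil]
  omega

-- ===== VERDICT (by name: the statement is the Claim_ definition above) =====
theorem gen_color_bars_spec : Claim_equal_gen_color_bars := by
  intro n_per_color _
  unfold Spec_gen_color_bars
  exact pv_main n_per_color
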